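-- pv_equiv track=rewrite | github.com/robbieowens15/UVA_CS_HW_Labs_Mini-projects | blockchain/P2/ecdsa.py | scalar_point_multiplication
-- ===== SOURCE A (Python) =====
-- def get_slope_at_point(x, y, field_size): #! may need to make adjustments for finite field!
-- 	rise = multiplication(3, exponentiation(x, 2, field_size), field_size)
-- 	run = multiplication(2, y, field_size)
-- 	return division(rise, run, field_size)
--
-- def get_slope_between_points(x1, y1, x2, y2, field_size): #! may need to make adjustments for finite field!
-- 	rise = subtraction(y2, y1, field_size)
-- 	run = subtraction(x2, x1, field_size)
-- 	return division(rise, run, field_size)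
--
-- def add_self(P, field_size):
-- 	slope = get_slope_at_point(P[0], P[1], field_size)
-- 	x3 = subtraction(subtraction(exponentiation(slope, 2, field_size), P[0], field_size), P[0], field_size)
-- 	y3 = subtraction(multiplication(slope, subtraction(P[0], x3, field_size), field_size), P[1], field_size)
-- 	return (x3,y3)
--
-- def add_two_points(Q, R, field_size):
-- 	if Q == R: # corner case
-- 		return add_self(Q, field_size)
-- 	slope = get_slope_between_points(Q[0], Q[1], R[0], R[1], field_size)
-- 	x3 = subtraction(subtraction(exponentiation(slope, 2, field_size), Q[0], field_size), R[0], field_size)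
-- 	y3 = subtraction(multiplication(slope, subtraction(Q[0], x3, field_size), field_size), Q[1], field_size)
-- 	return (x3,y3)
--
-- def scalar_point_multiplication(k, Q, field_size):
-- 	bit_arr = format(k, "b")[::-1]
-- 	nQ = [(0,0)] * len(bit_arr)
-- 	nQ[0] = Q
-- 	for i in range(1, len(nQ)):
-- 		nQ[i] = add_self(nQ[i-1], field_size)
-- 	P = None
-- 	for i in range(len(bit_arr)):
-- 		if bit_arr[i] == "1" and P is None:
-- 			P = nQ[i]
-- 		elif bit_arr[i] == "1":
-- 			P = add_two_points(P, nQ[i], field_size)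
--
-- 	return P
--
-- def addition(x, y, field_size):
-- 	return (x + y) % field_size
--
-- def multiplication(x, y, field_size):
-- 	return (x * y) % field_size
--
-- def exponentiation(x, y, field_size):
-- 	return (x ** y) % field_size
--
-- def subtraction(x, y, field_size):
-- 	add_inv = get_additive_inverse(y, field_size)
-- 	ans = addition(x, add_inv, field_size)
-- 	while ans < 0:
-- 		ans += field_size
-- 	return ans
--
-- def division(x, y, field_size):
-- 	mul_inv = get_multiplicative_inverse(y, field_size)
-- 	return (x * mul_inv) % field_size
--
-- def get_additive_inverse(x, field_size):
-- 	return field_size - x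
--
-- def get_multiplicative_inverse(x, field_size):
-- 	return (x ** (field_size -2)) % field_size
-- ===== SOURCE B (Python) =====
-- # Recursive double-and-add by arithmetic halving of |k| (no bit string, no
-- # precomputed table, no second scan), inverses via three-argument pow; faster.
--
-- def _inv(x, p):
--     return pow(x, p - 2, p)
--
-- def _double(P, p):
--     x, y = P
--     s = (3 * x * x % p) * _inv(2 * y % p, p) % p
--     x3 = (s * s - 2 * x) % p
--     y3 = (s * (x - x3) - y) % p
--     return (x3, y3)
--
-- def _add(P, R, p):
--     if P == R:  # corner case, as in the original
--         return _double(P, p)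
--     x1, y1 = P
--     x2, y2 = R
--     s = (y2 - y1) * _inv((x2 - x1) % p, p) % p
--     x3 = (s * s - x1 - x2) % p
--     y3 = (s * (x1 - x3) - y1) % p
--     return (x3, y3)
--
-- def _go(n, cur, acc, p):
--     if n == 0:
--         return acc
--     if n % 2:
--         acc = cur if acc is None else _add(acc, cur, p)
--     return _go(n // 2, _double(cur, p), acc, p)
--
-- def scalar_point_multiplication(k, Q, field_size):
--     return _go(abs(k), Q, None, field_size)
-- ===== Notes on version B (the rewrite author's own statement) =====
-- stated objective: faster
-- what changed: Replaces the bit-string formatting, the precomputed doubling table and the second scan with a recursive double-and-add that halves |k| arithmetically in a single pass, and computes modular inverses with three-argument pow instead of the full integer power x**(field_size-2).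
-- outside the precondition, e.g. on scalar_point_multiplication(1, (2, 3), 0): A returns (2, 3), B raises ZeroDivisionError
import Mathlib
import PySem

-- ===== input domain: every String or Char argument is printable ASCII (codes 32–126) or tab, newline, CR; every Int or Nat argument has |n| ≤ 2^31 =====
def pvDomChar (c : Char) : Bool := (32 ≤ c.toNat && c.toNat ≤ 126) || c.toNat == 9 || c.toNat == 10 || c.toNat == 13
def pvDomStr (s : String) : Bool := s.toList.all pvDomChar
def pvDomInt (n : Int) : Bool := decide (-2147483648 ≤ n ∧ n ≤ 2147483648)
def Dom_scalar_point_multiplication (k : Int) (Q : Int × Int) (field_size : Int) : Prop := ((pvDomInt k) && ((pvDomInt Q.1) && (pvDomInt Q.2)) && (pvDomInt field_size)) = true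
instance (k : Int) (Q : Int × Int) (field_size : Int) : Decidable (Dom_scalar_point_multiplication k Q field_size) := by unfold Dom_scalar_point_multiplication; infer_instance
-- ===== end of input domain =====

-- B replaces A's bit-string + precomputed doubling table + second scan with a
-- recursive double-and-add over |k| by arithmetic halving, and three-argument
-- pow for inverses (objective: faster).


-- ===== PORT A =====
def pvAddition (x y field_size : Int) : Int := PySem.Int.mod (x + y) field_size

def pvMultiplication (x y field_size : Int) : Int := PySem.Int.mod (x * y) field_size

-- x ** y: every exponent A uses is nonnegative inside Pre_; .toNat only makes the port total
def pvExponentiation (x y field_size : Int) : Int := PySem.Int.mod (x ^ y.toNat) field_size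

def pvGetAdditiveInverse (x field_size : Int) : Int := field_size - x

def pvGetMultiplicativeInverse (x field_size : Int) : Int :=
  PySem.Int.mod (x ^ (field_size - 2).toNat) field_size

-- 'while ans < 0: ans += field_size'; the '0 < field_size' guard only makes the loop total
-- (for field_size ≤ 0 and ans < 0 the Python loop never terminates; that lies outside Pre_)
def pvFixNeg (ans field_size : Int) : Int :=
  if _h : ans < 0 ∧ 0 < field_size then pvFixNeg (ans + field_size) field_size else ans
termination_by (-ans).toNat
decreasing_by omega

def pvSubtraction (x y field_size : Int) : Int :=
  pvFixNeg (pvAddition x (pvGetAdditiveInverse y field_size) field_size) field_size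

def pvDivision (x y field_size : Int) : Int :=
  PySem.Int.mod (x * pvGetMultiplicativeInverse y field_size) field_size

def pvGetSlopeAtPoint (x y field_size : Int) : Int :=
  let rise := pvMultiplication 3 (pvExponentiation x 2 field_size) field_size
  let run := pvMultiplication 2 y field_size
  pvDivision rise run field_size

def pvGetSlopeBetweenPoints (x1 y1 x2 y2 field_size : Int) : Int :=
  let rise := pvSubtraction y2 y1 field_size
  let run := pvSubtraction x2 x1 field_size
  pvDivision rise run field_size

def pvAddSelf (P : Int × Int) (field_size : Int) : Int × Int :=
  let slope := pvGetSlopeAtPoint P.1 P.2 field_size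
  let x3 := pvSubtraction (pvSubtraction (pvExponentiation slope 2 field_size) P.1 field_size) P.1 field_size
  let y3 := pvSubtraction (pvMultiplication slope (pvSubtraction P.1 x3 field_size) field_size) P.2 field_size
  (x3, y3)

def pvAddTwoPoints (Q R : Int × Int) (field_size : Int) : Int × Int :=
  if Q = R then pvAddSelf Q field_size
  else
    let slope := pvGetSlopeBetweenPoints Q.1 Q.2 R.1 R.2 field_size
    let x3 := pvSubtraction (pvSubtraction (pvExponentiation slope 2 field_size) Q.1 field_size) R.1 field_size
    let y3 := pvSubtraction (pvMultiplication slope (pvSubtraction Q.1 x3 field_size) field_size) Q.2 field_size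
    (x3, y3)

-- nQ[0] = Q; for i in range(1, len(nQ)): nQ[i] = add_self(nQ[i-1])
def pvTable (field_size : Int) (P : Int × Int) : Nat → List (Int × Int)
  | 0 => []
  | n + 1 => P :: pvTable field_size (pvAddSelf P field_size) n

def scalar_point_multiplication (k : Int) (Q : Int × Int) (field_size : Int) : Option (Int × Int) :=
  let bit_arr := (PySem.Int.toBinChars k).reverse
  let nQ := pvTable field_size Q bit_arr.length
  (bit_arr.zip nQ).foldl
    (fun P bq =>
      if bq.1 = '1' then
        match P with
        | none => some bq.2
        | some p => some (pvAddTwoPoints p bq.2 field_size)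
      else P)
    none

-- ===== PORT B =====
-- pow(x, p-2, p) is PySem.Int.powMod; the exponent is nonnegative inside Pre_, .toNat makes it total
def bInv (x p : Int) : Int := PySem.Int.powMod x (p - 2).toNat p

def bDouble (P : Int × Int) (p : Int) : Int × Int :=
  let s := PySem.Int.mod (PySem.Int.mod (3 * P.1 * P.1) p * bInv (PySem.Int.mod (2 * P.2) p) p) p
  let x3 := PySem.Int.mod (s * s - 2 * P.1) p
  let y3 := PySem.Int.mod (s * (P.1 - x3) - P.2) p
  (x3, y3)

def bAdd (P R : Int × Int) (p : Int) : Int × Int :=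
  if P = R then bDouble P p
  else
    let s := PySem.Int.mod ((R.2 - P.2) * bInv (PySem.Int.mod (R.1 - P.1) p) p) p
    let x3 := PySem.Int.mod (s * s - P.1 - R.1) p
    let y3 := PySem.Int.mod (s * (P.1 - x3) - P.2) p
    (x3, y3)

-- _go(n, cur, acc, p); Python returns acc at n == 0 and is only ever entered with n = abs(k) ≥ 0,
-- so n < 0 is unreachable from the entry (in Python it would not terminate); 'n ≤ 0' makes it total
def bGo (n : Int) (cur : Int × Int) (acc : Option (Int × Int)) (p : Int) : Option (Int × Int) :=
  if _h : n ≤ 0 then acc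
  else
    let acc' := if PySem.Int.mod n 2 ≠ 0 then
        some (match acc with | none => cur | some q => bAdd q cur p)
      else acc
    bGo (PySem.Int.floordiv n 2) (bDouble cur p) acc' p
termination_by n.toNat
decreasing_by
  simp only [PySem.Int.floordiv, Int.fdiv_eq_ediv]
  omega

def scalar_point_multiplication_alt (k : Int) (Q : Int × Int) (field_size : Int) : Option (Int × Int) :=
  bGo |k| Q none field_size

-- ===== PRECONDITION & SPEC =====
-- Pre_ excludes field_size < 2 with k ≠ 0: there A's modular arithmetic raises ZeroDivisionError,
-- loops forever, or produces floats whenever |k| has at least two bits, while B's own arithmetic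
-- raises already for |k| = 1 (its pow(x, field_size-2, field_size) is invalid); for k = 0 both
-- return None without touching the field, so k = 0 stays inside Pre_ for every field_size.
def Pre_scalar_point_multiplication (k : Int) (Q : Int × Int) (field_size : Int) : Prop :=
  k = 0 ∨ 2 ≤ field_size
instance (k : Int) (Q : Int × Int) (field_size : Int) : Decidable (Pre_scalar_point_multiplication k Q field_size) := by unfold Pre_scalar_point_multiplication; infer_instance

def pvWitness_scalar_point_multiplication : Int × (Int × Int) × Int := (5, (2, 3), 7)

def Spec_scalar_point_multiplication (k : Int) (Q : Int × Int) (field_size : Int) (out : Option (Int × Int)) : Prop := out = scalar_point_multiplication_alt k Q field_size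
instance (k : Int) (Q : Int × Int) (field_size : Int) (out : Option (Int × Int)) : Decidable (Spec_scalar_point_multiplication k Q field_size out) := by unfold Spec_scalar_point_multiplication; infer_instance

-- ===== CLAIM (what is proved, stated in full; the proofs are below) =====
def Claim_equal_scalar_point_multiplication : Prop := ∀ (k : Int) (Q : Int × Int) (field_size : Int), Dom_scalar_point_multiplication k Q field_size → Pre_scalar_point_multiplication k Q field_size → Spec_scalar_point_multiplication k Q field_size (scalar_point_multiplication k Q field_size)

-- ===== LEMMAS AND PROOFS =====

theorem pvFixNeg_of_nonneg {ans field_size : Int} (h : 0 ≤ ans) :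
    pvFixNeg ans field_size = ans := by
  unfold pvFixNeg
  simp [show ¬ (ans < 0 ∧ 0 < field_size) by omega]

theorem emod_sub_left (a b p : Int) : (a % p - b) % p = (a - b) % p := by
  rw [Int.sub_emod a b, Int.sub_emod (a % p) b, Int.emod_emod_of_dvd a dvd_rfl]

theorem emod_mul_right (a b p : Int) : (a * (b % p)) % p = (a * b) % p := by
  rw [Int.mul_emod a b, Int.mul_emod a (b % p), Int.emod_emod_of_dvd b dvd_rfl]

theorem emod_mul_left (a b p : Int) : (a % p * b) % p = (a * b) % p := by
  rw [Int.mul_emod a b, Int.mul_emod (a % p) b, Int.emod_emod_of_dvd a dvd_rfl]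

theorem mod_poly3 (p a c d : Int) : ((a % p - c) % p - d) % p = (a - c - d) % p := by
  rw [emod_sub_left, show a % p - c - d = a % p - (c + d) by ring, emod_sub_left,
    show a - (c + d) = a - c - d by ring]

theorem mod_polyY (p s d y : Int) : (s * (d % p) % p - y) % p = (s * d - y) % p := by
  rw [emod_mul_right, emod_sub_left]

theorem mod_polyY' (p a b c : Int) : (a % p * b - c) % p = (a * b - c) % p := by
  rw [Int.sub_emod, emod_mul_left, ← Int.sub_emod]

theorem pvSubtraction_eq {p : Int} (hp : 0 < p) (x y : Int) :
    pvSubtraction x y p = (x - y) % p := by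
  unfold pvSubtraction pvAddition pvGetAdditiveInverse
  rw [PySem.Int.mod_eq_emod_of_pos hp,
    pvFixNeg_of_nonneg (Int.emod_nonneg _ (by omega)),
    show x + (p - y) = (x - y) + 1 * p by ring, Int.add_mul_emod_self_right]

theorem pvAddSelf_eq {p : Int} (hp : 2 ≤ p) (P : Int × Int) :
    pvAddSelf P p = bDouble P p := by
  have h1 : (0:Int) < p := by omega
  unfold pvAddSelf bDouble pvGetSlopeAtPoint pvDivision pvMultiplication pvExponentiation
    pvGetMultiplicativeInverse bInv
  rw [PySem.Int.powMod_eq]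
  simp only [PySem.Int.mod_eq_emod_of_pos h1, pvSubtraction_eq h1,
    show Int.toNat 2 = 2 from rfl]
  rw [show (3:Int) * (P.1 ^ 2 % p) % p = 3 * P.1 * P.1 % p from by
    rw [emod_mul_right]; congr 1; ring]
  simp only [mod_poly3]
  rw [show ∀ s : Int, s ^ 2 - P.1 - P.1 = s * s - 2 * P.1 from fun s => by ring]
  simp only [mod_polyY]

theorem pvAddTwoPoints_eq {p : Int} (hp : 2 ≤ p) (Q R : Int × Int) :
    pvAddTwoPoints Q R p = bAdd Q R p := by
  have h1 : (0:Int) < p := by omega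
  unfold pvAddTwoPoints bAdd
  by_cases hqr : Q = R
  · simp [hqr, pvAddSelf_eq hp]
  · simp only [hqr, if_false]
    unfold pvGetSlopeBetweenPoints pvDivision pvMultiplication pvExponentiation
      pvGetMultiplicativeInverse bInv
    rw [PySem.Int.powMod_eq]
    simp only [PySem.Int.mod_eq_emod_of_pos h1, pvSubtraction_eq h1,
      show Int.toNat 2 = 2 from rfl]
    simp only [emod_mul_left, mod_poly3]
    rw [show ∀ s : Int, s ^ 2 - Q.1 - R.1 = s * s - Q.1 - R.1 from fun s => by ring]
    simp only [mod_polyY, mod_polyY']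

-- the interleaved step A's table-fold is first reduced to
def pvStep (p : Int) (st : Option (Int × Int) × (Int × Int)) (b : Char) :
    Option (Int × Int) × (Int × Int) :=
  (if b = '1' then
     some (match st.1 with | none => st.2 | some q => bAdd q st.2 p)
   else st.1,
   bDouble st.2 p)

theorem loop_eq {p : Int} (hp : 2 ≤ p) (bs : List Char) :
    ∀ (P : Option (Int × Int)) (cur : Int × Int),
    (bs.zip (pvTable p cur bs.length)).foldl
      (fun P bq =>
        if bq.1 = '1' then
          match P with
          | none => some bq.2
          | some q => some (pvAddTwoPoints q bq.2 p)
        else P) P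
    = (bs.foldl (pvStep p) (P, cur)).1 := by
  induction bs with
  | nil => intro P cur; rfl
  | cons b bs ih =>
    intro P cur
    simp only [List.length_cons, pvTable, List.zip_cons_cons, List.foldl_cons]
    rw [ih]
    rw [pvAddSelf_eq hp]
    cases P with
    | none => by_cases hb : b = '1' <;> simp [hb, pvStep]
    | some q => by_cases hb : b = '1' <;> simp [hb, pvStep, pvAddTwoPoints_eq hp]

-- value of a char list read as LSB-first binary ('1' = 1, anything else = 0)
def pvVal : List Char → Nat
  | [] => 0
  | c :: cs => (if c = '1' then 1 else 0) + 2 * pvVal cs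

theorem pvVal_append (xs ys : List Char) :
    pvVal (xs ++ ys) = pvVal xs + 2 ^ xs.length * pvVal ys := by
  induction xs with
  | nil => simp [pvVal]
  | cons c cs ih => simp [pvVal, ih, pow_succ]; ring

theorem toDigitsCore_val : ∀ (fuel n : Nat) (ds : List Char), n < fuel →
    pvVal ((Nat.toDigitsCore 2 fuel n ds).reverse) = pvVal ds.reverse + 2 ^ ds.length * n := by
  intro fuel
  induction fuel with
  | zero => omega
  | succ fuel ih =>
    intro n ds hn
    have hbit : (if (n % 2).digitChar = '1' then 1 else 0) = n % 2 := by
      rcases Nat.mod_two_eq_zero_or_one n with h | h <;> simp [h, Nat.digitChar]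
    rw [Nat.toDigitsCore]
    by_cases h0 : n / 2 = 0
    · simp only [h0, if_true]
      have hsing : pvVal [(n % 2).digitChar] = n % 2 := by simpa [pvVal] using hbit
      have hn2 : n % 2 = n := by omega
      rw [List.reverse_cons, pvVal_append, List.length_reverse, hsing, hn2]
    · simp only [h0, if_false]
      rw [ih (n / 2) ((n % 2).digitChar :: ds) (by omega)]
      rw [List.reverse_cons, pvVal_append, List.length_reverse, List.length_cons]
      simp only [pvVal, hbit, pow_succ]
      have hmd : n % 2 + 2 * (n / 2) = n := Nat.mod_add_div n 2
      calc pvVal ds.reverse + (2 ^ ds.length * (n % 2) + 0) + 2 ^ ds.length * 2 * (n / 2)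
          = pvVal ds.reverse + 2 ^ ds.length * (n % 2 + 2 * (n / 2)) := by ring
        _ = pvVal ds.reverse + 2 ^ ds.length * n := by rw [hmd]

theorem pvVal_toBinChars (k : Int) :
    pvVal ((PySem.Int.toBinChars k).reverse) = k.natAbs := by
  unfold PySem.Int.toBinChars
  have hd : ∀ m : Nat, pvVal ((Nat.toDigits 2 m).reverse) = m := by
    intro m
    have := toDigitsCore_val (m + 1) m [] (by omega)
    simpa [Nat.toDigits, pvVal] using this
  by_cases hk : k < 0
  · simp only [hk, if_true, List.reverse_cons, pvVal_append]
    simp [pvVal, hd]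
  · simp only [hk, if_false, hd]
    omega

theorem fold_eq_bGo (p : Int) (bs : List Char) :
    ∀ (acc : Option (Int × Int)) (cur : Int × Int),
    (bs.foldl (pvStep p) (acc, cur)).1 = bGo (pvVal bs : Int) cur acc p := by
  induction bs with
  | nil =>
    intro acc cur
    rw [bGo.eq_def]
    simp [pvVal]
  | cons c cs ih =>
    intro acc cur
    simp only [List.foldl_cons]
    rw [ih]
    conv_rhs => rw [bGo.eq_def]
    have hv : pvVal (c :: cs) = (if c = '1' then 1 else 0) + 2 * pvVal cs := rfl
    by_cases h0 : (pvVal (c :: cs) : Int) ≤ 0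
    · -- the whole remaining value is 0: no bit is set anywhere
      have hz : pvVal (c :: cs) = 0 := by omega
      rw [hv] at hz
      have hc : ¬ c = '1' := by intro h; rw [if_pos h] at hz; omega
      rw [if_neg hc] at hz
      have hcs : pvVal cs = 0 := by omega
      simp only [h0, dite_true]
      rw [hcs]
      rw [show ((0 : Nat) : Int) = 0 from rfl]
      rw [bGo.eq_def]
      simp [pvStep, hc]
    · simp only [h0, dite_false]
      have hmod : PySem.Int.mod (pvVal (c :: cs) : Int) 2 = ((pvVal (c :: cs) % 2 : Nat) : Int) := by
        rw [PySem.Int.mod_eq_emod_of_pos (by omega : (0:Int) < 2)]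
        push_cast
        omega
      have hdiv : PySem.Int.floordiv (pvVal (c :: cs) : Int) 2 = ((pvVal (c :: cs) / 2 : Nat) : Int) := by
        rw [PySem.Int.floordiv, Int.fdiv_eq_ediv,
          if_pos (Or.inl (by norm_num : (0:Int) ≤ 2)), sub_zero]
        push_cast
        omega
      rw [hmod, hdiv]
      have hm : pvVal (c :: cs) / 2 = pvVal cs := by rw [hv]; split <;> omega
      rw [hm]
      by_cases hc : c = '1'
      · have hb : pvVal (c :: cs) % 2 = 1 := by rw [hv, hc]; simp
        rw [hb]
        cases acc <;> simp [pvStep, hc]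
      · have hb : pvVal (c :: cs) % 2 = 0 := by rw [hv]; simp [hc]
        rw [hb]
        simp [pvStep, hc]

-- ===== VERDICT (by name: the statement is the Claim_ definition above) =====
theorem scalar_point_multiplication_spec : Claim_equal_scalar_point_multiplication := by
  intro k Q fs _hDom hPre
  unfold Spec_scalar_point_multiplication
  rcases hPre with hk | hp
  · -- k = 0: both sides are none without touching the field
    subst hk
    show scalar_point_multiplication 0 Q fs = scalar_point_multiplication_alt 0 Q fs
    unfold scalar_point_multiplication scalar_point_multiplication_alt
    rw [bGo.eq_def]
    simp [PySem.Int.toBinChars, Nat.toDigits, Nat.toDigitsCore, pvTable]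
    decide
  · unfold scalar_point_multiplication scalar_point_multiplication_alt
    rw [loop_eq hp _ none Q, fold_eq_bGo, pvVal_toBinChars,
      show |k| = (k.natAbs : Int) from (Int.abs_eq_natAbs k)]
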